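-- pv_equiv track=rewrite | github.com/alhassane-coder/correcteur_orthographique | udp_server.py | detecter_langue
-- ===== SOURCE A (Python) =====
-- def detecter_langue(texte, dictionnaires):
--     """Retourne la langue dont le dictionnaire partage le plus de mots avec le texte."""
--     mots = set(texte.lower().split())
--     meilleure_langue = None
--     meilleur_score = -1
--     for langue, ensemble_mots in dictionnaires.items():
--         mots_communs = len(mots & ensemble_mots)
--         if mots_communs > meilleur_score:
--             meilleur_score = mots_communs
--             meilleure_langue = langue
--     return meilleure_langue
-- ===== SOURCE B (Python) =====
-- def detecter_langue(texte, dictionnaires):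
--     """Retourne la langue dont le dictionnaire partage le plus de mots avec le texte."""
--     mots = set(texte.lower().split())
--     scores = {langue: 0 for langue in dictionnaires}
--     for mot in mots:
--         for langue, ensemble in dictionnaires.items():
--             if mot in ensemble:
--                 scores[langue] += 1
--     meilleure_langue = None
--     meilleur_score = -1
--     for langue, score in scores.items():
--         if score > meilleur_score:
--             meilleur_score = score
--             meilleure_langue = langue
--     return meilleure_langue
-- ===== Notes on version B (the rewrite author's own statement) =====
-- stated objective: alternative
-- what changed: Replaces the per-language set-intersection pass by a word-driven accumulation: a score table initialised to 0 per language is incremented once for each (word, language) hit, then the first maximum in dict order is selected.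
import Mathlib
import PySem

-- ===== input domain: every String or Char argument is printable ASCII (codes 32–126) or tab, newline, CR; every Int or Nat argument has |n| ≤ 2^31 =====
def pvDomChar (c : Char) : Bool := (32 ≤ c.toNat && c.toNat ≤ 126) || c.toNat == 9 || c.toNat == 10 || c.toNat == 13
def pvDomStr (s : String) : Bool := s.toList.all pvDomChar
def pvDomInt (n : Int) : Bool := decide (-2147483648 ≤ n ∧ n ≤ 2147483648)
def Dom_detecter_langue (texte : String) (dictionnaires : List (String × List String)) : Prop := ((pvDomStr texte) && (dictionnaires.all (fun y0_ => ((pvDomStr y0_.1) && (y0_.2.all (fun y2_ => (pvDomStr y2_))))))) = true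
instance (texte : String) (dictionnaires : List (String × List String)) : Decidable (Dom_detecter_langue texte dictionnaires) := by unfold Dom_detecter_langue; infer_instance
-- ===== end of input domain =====

-- B replaces the per-language set-intersection pass by a word-driven score accumulation (alternative decomposition, not faster).


-- ===== PORT A =====
def detecter_langue (texte : String) (dictionnaires : List (String × List String)) : Option String :=
  let mots : PySem.Set String := PySem.Set.ofList (PySem.Str.split₀ (PySem.Str.lower texte))
  let r := (PySem.Dict.ofList dictionnaires).items.foldl
    (fun (st : Option String × Int) p =>
      let motsCommuns : Int := (PySem.Set.inter mots p.2).length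
      if motsCommuns > st.2 then (some p.1, motsCommuns) else st)
    (none, -1)
  r.1

-- ===== PORT B =====
def detecter_langue_alt (texte : String) (dictionnaires : List (String × List String)) : Option String :=
  let mots : PySem.Set String := PySem.Set.ofList (PySem.Str.split₀ (PySem.Str.lower texte))
  let d := PySem.Dict.ofList dictionnaires
  let scores0 : PySem.Dict String Int := d.keys.foldl (fun sc k => sc.insert k 0) PySem.Dict.empty
  -- the final per-language counts do not depend on the iteration order over the set 'mots'
  let scores := mots.foldl (fun sc mot =>
      d.items.foldl (fun sc p => if p.2.contains mot then sc.modify p.1 0 (· + 1) else sc) sc) scores0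
  let r := scores.items.foldl
    (fun (st : Option String × Int) p => if p.2 > st.2 then (some p.1, p.2) else st)
    (none, -1)
  r.1

-- ===== PRECONDITION & SPEC =====
def Spec_detecter_langue (texte : String) (dictionnaires : List (String × List String)) (out : Option String) : Prop := out = detecter_langue_alt texte dictionnaires
instance (texte : String) (dictionnaires : List (String × List String)) (out : Option String) : Decidable (Spec_detecter_langue texte dictionnaires out) := by unfold Spec_detecter_langue; infer_instance

-- ===== CLAIM (what is proved, stated in full; the proofs are below) =====
def Claim_equal_detecter_langue : Prop := ∀ (texte : String) (dictionnaires : List (String × List String)), Dom_detecter_langue texte dictionnaires → Spec_detecter_langue texte dictionnaires (detecter_langue texte dictionnaires)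

-- ===== LEMMAS AND PROOFS =====

-- a fold that skips elements failing c is a fold over the filtered list
lemma pv_foldl_if_skip {α β : Type} (c : α → Bool) (f : β → α → β) :
    ∀ (l : List α) (b : β),
      l.foldl (fun b a => if c a then f b a else b) b = (l.filter c).foldl f b := by
  intro l
  induction l with
  | nil => intro b; rfl
  | cons a l ih =>
    intro b
    by_cases h : c a <;> simp [h, ih]

-- inserting pairwise-fresh keys with value 0 appends them in order
lemma pv_scores0_items :
    ∀ (ks : List String) (acc : PySem.Dict String Int),
      ((acc.items.map Prod.fst) ++ ks).Nodup →
      (ks.foldl (fun sc k => sc.insert k 0) acc).items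
        = acc.items ++ ks.map (fun k => (k, (0 : Int))) := by
  intro ks
  induction ks with
  | nil => intro acc _; simp
  | cons k ks ih =>
    intro acc h
    have hdisj := (List.nodup_append.mp h).2.2
    have hknot : k ∉ acc.items.map Prod.fst := fun hmem =>
      (hdisj k hmem k (by simp)) rfl
    have hc : acc.contains k = false := by
      simp only [PySem.Dict.contains, List.any_eq_false]
      intro p hp hbeq
      exact hknot (List.mem_map.mpr ⟨p, hp, by simpa using hbeq⟩)
    have hins : (acc.insert k 0).items = acc.items ++ [(k, (0 : Int))] := by
      simp [PySem.Dict.insert, hc]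
    rw [List.foldl_cons, ih (acc.insert k 0) (by rw [hins]; simpa using h), hins]
    simp

-- first-match lookup in a list with distinct keys finds the member itself
lemma pv_find_nodup {ν : Type} :
    ∀ (l : List (String × ν)) (p : String × ν),
      (l.map Prod.fst).Nodup → p ∈ l →
      l.find? (fun q => q.1 == p.1) = some p := by
  intro l
  induction l with
  | nil => intro p _ hp; cases hp
  | cons q l ih =>
    intro p hnd hp
    have hq : q.1 ∉ l.map Prod.fst := (List.nodup_cons.mp (by simpa using hnd)).1
    rcases List.mem_cons.mp hp with hp | hp
    · subst hp; simp
    · have hne : (q.1 == p.1) = false := by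
        apply beq_false_of_ne
        intro he
        exact hq (he ▸ List.mem_map.mpr ⟨p, hp, rfl⟩)
      rw [List.find?_cons, hne]
      exact ih p (List.nodup_cons.mp (by simpa using hnd)).2 hp

-- lookup of a member's own key with distinct keys
lemma pv_getD_mem (d : PySem.Dict String Int) (p : String × Int)
    (hnd : (d.items.map Prod.fst).Nodup) (hp : p ∈ d.items) :
    d.getD p.1 0 = p.2 := by
  simp [PySem.Dict.getD, PySem.Dict.get?, pv_find_nodup d.items p hnd hp]

-- a counter-style modify fold adds the multiplicity of each key
lemma pv_counter_fold_items :
    ∀ (L : List String) (d : PySem.Dict String Int),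
      (d.items.map Prod.fst).Nodup → (∀ k ∈ L, k ∈ d.items.map Prod.fst) →
      (L.foldl (fun sc k => sc.modify k 0 (· + 1)) d).items
        = d.items.map (fun p => (p.1, p.2 + (L.count p.1 : Int))) := by
  intro L
  induction L with
  | nil =>
    intro d _ _
    simp
  | cons k L ih =>
    intro d hnd hmem
    have hk : k ∈ d.items.map Prod.fst := hmem k (by simp)
    have hc : d.contains k = true := by
      rcases List.mem_map.mp hk with ⟨p, hp, hpk⟩
      simp only [PySem.Dict.contains, List.any_eq_true]
      exact ⟨p, hp, by simp [hpk]⟩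
    have hstep : (d.modify k 0 (· + 1)).items
        = d.items.map (fun q => if q.1 == k then (q.1, q.2 + 1) else q) := by
      simp only [PySem.Dict.modify, PySem.Dict.insert, hc, if_true]
      apply List.map_congr_left
      intro q hq
      by_cases hqk : q.1 = k
      · have hgd : d.getD k 0 = q.2 := by
          rw [← hqk]; exact pv_getD_mem d q hnd hq
        simp [hqk, hgd]
      · simp [beq_false_of_ne hqk]
    have hfst : ((d.modify k 0 (· + 1)).items.map Prod.fst) = d.items.map Prod.fst := by
      rw [hstep, List.map_map]
      apply List.map_congr_left
      intro q hq
      by_cases hqk : q.1 = k <;> simp [hqk]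
    rw [List.foldl_cons, ih (d.modify k 0 (· + 1)) (by rw [hfst]; exact hnd)
        (fun k' hk' => by rw [hfst]; exact hmem k' (by simp [hk']))]
    rw [hstep, List.map_map]
    apply List.map_congr_left
    intro q hq
    by_cases hqk : q.1 = k
    · have hb : (q.1 == k) = true := by simp [hqk]
      have hb' : (k == q.1) = true := by simp [hqk]
      simp only [Function.comp_def, hb, if_true, List.count_cons, hb']
      simp only [hqk]
      push_cast
      ring_nf
    · have hb : (q.1 == k) = false := beq_false_of_ne hqk
      have hb' : (k == q.1) = false := beq_false_of_ne (fun h => hqk h.symm)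
      simp only [Function.comp_def, hb, Bool.false_eq_true, List.count_cons, hb']
      simp

-- with distinct keys, a member's key occurs in the filtered key list iff the member passes the filter
lemma pv_count_filter_map_fst {ν : Type} :
    ∀ (l : List (String × ν)) (c : String × ν → Bool) (p : String × ν),
      (l.map Prod.fst).Nodup → p ∈ l →
      ((l.filter c).map Prod.fst).count p.1 = if c p then 1 else 0 := by
  intro l
  induction l with
  | nil => intro c p _ hp; cases hp
  | cons q l ih =>
    intro c p hnd hp
    have hq : q.1 ∉ l.map Prod.fst := (List.nodup_cons.mp (by simpa using hnd)).1
    have hnd' : (l.map Prod.fst).Nodup := (List.nodup_cons.mp (by simpa using hnd)).2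
    rcases List.mem_cons.mp hp with hp | hp
    · subst hp
      have hz : ((l.filter c).map Prod.fst).count p.1 = 0 := by
        apply List.count_eq_zero_of_not_mem
        intro hmem
        rcases List.mem_map.mp hmem with ⟨r, hr, hrq⟩
        exact hq (hrq ▸ List.mem_map.mpr ⟨r, (List.mem_filter.mp hr).1, rfl⟩)
      by_cases hcq : c p
      · simp [hcq, hz]
      · simp [hcq, hz]
    · have hne : p.1 ≠ q.1 := fun he =>
        hq (he ▸ List.mem_map.mpr ⟨p, hp, rfl⟩)
      have hb : (q.1 == p.1) = false := beq_false_of_ne (fun h => hne h.symm)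
      by_cases hcq : c q
      · simp [hcq, List.count_cons, hb, ih c p hnd' hp]
      · simp [hcq, ih c p hnd' hp]

-- multiplicity of a member's key in the word-driven hit list = its word count
lemma pv_count_flatMap (mots : List String) (l : List (String × List String))
    (p : String × List String) (hnd : (l.map Prod.fst).Nodup) (hp : p ∈ l) :
    (mots.flatMap (fun mot => (l.filter (fun q => q.2.contains mot)).map Prod.fst)).count p.1
      = mots.countP (fun mot => p.2.contains mot) := by
  induction mots with
  | nil => simp
  | cons mot mots ih =>
    rw [List.flatMap_cons, List.count_append, ih,
      pv_count_filter_map_fst l (fun q => q.2.contains mot) p hnd hp, List.countP_cons]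
    by_cases h : p.2.contains mot <;> simp [h] <;> omega

set_option maxHeartbeats 2000000 in
lemma pv_main (texte : String) (dictionnaires : List (String × List String)) :
    detecter_langue texte dictionnaires = detecter_langue_alt texte dictionnaires := by
  unfold detecter_langue detecter_langue_alt
  set mots : PySem.Set String := PySem.Set.ofList (PySem.Str.split₀ (PySem.Str.lower texte)) with hmots
  set l : List (String × List String) := (PySem.Dict.ofList dictionnaires).items with hl
  have hnd : (l.map Prod.fst).Nodup := PySem.Dict.nodup_keys_ofList dictionnaires
  have hin : ∀ (sc : PySem.Dict String Int) (mot : String),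
      l.foldl (fun sc p => if p.2.contains mot then sc.modify p.1 0 (· + 1) else sc) sc
        = ((l.filter (fun p => p.2.contains mot)).map Prod.fst).foldl
            (fun sc k => sc.modify k 0 (· + 1)) sc := by
    intro sc mot
    rw [pv_foldl_if_skip (fun p => p.2.contains mot)
      (fun sc p => sc.modify p.1 0 (· + 1)) l sc, List.foldl_map]
  simp only [PySem.Dict.keys, ← hl, hin]
  set sc0 : PySem.Dict String Int :=
    List.foldl (fun sc k => sc.insert k 0) PySem.Dict.empty (List.map (fun x => x.1) l) with hsc0
  have hflat : List.foldl (fun sc k => sc.modify k 0 (· + 1)) sc0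
        (mots.flatMap (fun mot => (l.filter (fun p => p.2.contains mot)).map Prod.fst))
      = List.foldl (fun sc mot => List.foldl (fun sc k => sc.modify k 0 (· + 1)) sc
          ((l.filter (fun p => p.2.contains mot)).map Prod.fst)) sc0 mots :=
    List.foldl_flatMap
  rw [← hflat]
  have h0 : sc0.items = l.map (fun p => (p.1, (0 : Int))) := by
    rw [hsc0, pv_scores0_items (List.map (fun x => x.1) l) PySem.Dict.empty
      (by
        have he : (PySem.Dict.empty : PySem.Dict String Int).items = [] := rfl
        rw [he]
        simp only [List.map_nil, List.nil_append]
        exact hnd)]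
    have he : (PySem.Dict.empty : PySem.Dict String Int).items = [] := rfl
    rw [he, List.nil_append, List.map_map]
    rfl
  have c1 : (sc0.items.map Prod.fst).Nodup := by
    rw [h0, List.map_map]; exact hnd
  have c2 : ∀ k ∈ (mots.flatMap (fun mot => (l.filter (fun p => p.2.contains mot)).map Prod.fst)),
      k ∈ sc0.items.map Prod.fst := by
    intro k hk
    rw [h0, List.map_map]
    rcases List.mem_flatMap.mp hk with ⟨mot, _, hkm⟩
    rcases List.mem_map.mp hkm with ⟨q, hq, hqk⟩
    exact List.mem_map.mpr ⟨q, (List.mem_filter.mp hq).1, hqk⟩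
  rw [pv_counter_fold_items
      (mots.flatMap (fun mot => (l.filter (fun p => p.2.contains mot)).map Prod.fst))
      sc0 c1 c2, h0, List.map_map]
  refine congrArg Prod.fst ?_
  rw [List.foldl_map]
  apply PySem.List.foldl_congr_mem
  intro st p hp
  have hc := pv_count_flatMap mots l p hnd hp
  have hlen : ((PySem.Set.inter mots p.2).length : Int)
      = ((mots.countP (fun w => p.2.contains w) : Nat) : Int) := by
    simp [PySem.Set.inter, List.countP_eq_length_filter]
  simp only [Function.comp_def, hlen, hc, zero_add]

-- ===== VERDICT (by name: the statement is the Claim_ definition above) =====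
theorem detecter_langue_spec : Claim_equal_detecter_langue := by
  intro texte dictionnaires _
  unfold Spec_detecter_langue
  exact pv_main texte dictionnaires
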